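-- pv_equiv track=rewrite | github.com/Nakazasen/skill-Anti-brain-wiki_note | scripts/abw_knowledge.py | _summarize_document
-- ===== SOURCE A (Python) =====
-- def _summarize_document(text, limit=420):
--     content = str(text or "")
--     if not content.strip():
--         return ""
--
--     lines = []
--     in_frontmatter = False
--     frontmatter_markers = 0
--     for raw in content.splitlines():
--         stripped = raw.strip()
--         if stripped == "---" and frontmatter_markers < 2:
--             in_frontmatter = not in_frontmatter
--             frontmatter_markers += 1
--             continue
--         if in_frontmatter or not stripped or stripped.startswith("#"):
--             continue
--         lines.append(stripped)
--
--     summary = " ".join(lines).strip()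
--     if len(summary) <= limit:
--         return summary
--     return summary[: limit - 3].rstrip() + "..."
-- ===== SOURCE B (Python) =====
-- def _summarize_document(text, limit=420):
--     content = str(text or "")
--     if not content.strip():
--         return ""
--
--     ss = [ln.strip() for ln in content.splitlines()]
--     # partition on the first two '---' markers: keep before the first and after the second
--     try:
--         i = ss.index("---")
--         try:
--             j = ss.index("---", i + 1)
--             kept = ss[:i] + ss[j + 1:]
--         except ValueError:
--             kept = ss[:i]
--     except ValueError:
--         kept = ss
--
--     lines = [s for s in kept if s and not s.startswith("#")]
--     summary = " ".join(lines).strip()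
--     if len(summary) <= limit:
--         return summary
--     return summary[: limit - 3].rstrip() + "..."
-- ===== Notes on version B (the rewrite author's own statement) =====
-- stated objective: alternative
-- what changed: Replaces A's stateful toggle/counter loop over lines with an index-based partition: find the first two frontmatter marker lines, keep the segments before the first and after the second, then filter and join; truncation is unchanged.
import Mathlib
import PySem

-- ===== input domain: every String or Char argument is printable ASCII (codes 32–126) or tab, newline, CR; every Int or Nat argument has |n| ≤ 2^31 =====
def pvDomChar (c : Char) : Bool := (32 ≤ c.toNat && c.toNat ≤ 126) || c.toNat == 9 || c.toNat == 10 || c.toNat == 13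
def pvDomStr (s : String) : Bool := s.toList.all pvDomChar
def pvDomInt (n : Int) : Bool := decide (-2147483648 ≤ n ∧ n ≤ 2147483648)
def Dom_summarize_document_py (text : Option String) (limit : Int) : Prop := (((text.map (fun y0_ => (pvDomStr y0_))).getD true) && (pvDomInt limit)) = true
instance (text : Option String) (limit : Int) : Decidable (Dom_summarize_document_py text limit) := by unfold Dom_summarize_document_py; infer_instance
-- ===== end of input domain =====

-- B replaces A's frontmatter toggle/counter loop with an index-based partition on the first two '---' markers (alternative decomposition, same cost).

-- ===== PORT A =====
-- the loop body of A's for-loop: state = (lines, in_frontmatter, frontmatter_markers)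
def pvStepA (st : List String × Bool × Nat) (raw : String) : List String × Bool × Nat :=
  let stripped := PySem.Str.strip raw
  if stripped = "---" ∧ st.2.2 < 2 then (st.1, !st.2.1, st.2.2 + 1)
  else if st.2.1 || stripped == "" || PySem.Str.startswith stripped "#" then st
  else (st.1 ++ [stripped], st.2.1, st.2.2)

def summarize_document_py (text : Option String) (limit : Int) : String :=
  let content := text.getD ""   -- str(text or ""): None and "" both give ""
  if PySem.Str.strip content = "" then ""
  else
    let st := (PySem.Str.splitlines content).foldl pvStepA ([], false, 0)
    let summary := PySem.Str.strip (PySem.Str.join " " st.1)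
    if (PySem.Str.len summary : Int) ≤ limit then summary
    else PySem.Str.rstrip (PySem.Str.slice summary none (some (limit - 3))) ++ "..."

-- ===== PORT B =====
def summarize_document_py_alt (text : Option String) (limit : Int) : String :=
  let content := text.getD ""   -- str(text or ""): None and "" both give ""
  if PySem.Str.strip content = "" then ""
  else
    let ss := (PySem.Str.splitlines content).map PySem.Str.strip
    let kept :=
      match PySem.List.index? ss "---" with
      | none => ss
      | some i =>
        -- ss.index("---", i + 1): first match at position ≥ i+1, as absolute index
        match (PySem.List.index? (ss.drop (i+1)) "---").map (· + (i+1)) with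
        | none => ss.take i
        | some j => ss.take i ++ ss.drop (j+1)
    let lines := kept.filter (fun s => !(s == "") && !(PySem.Str.startswith s "#"))
    let summary := PySem.Str.strip (PySem.Str.join " " lines)
    if (PySem.Str.len summary : Int) ≤ limit then summary
    else PySem.Str.rstrip (PySem.Str.slice summary none (some (limit - 3))) ++ "..."

-- ===== PRECONDITION & SPEC =====
def Spec_summarize_document_py (text : Option String) (limit : Int) (out : String) : Prop := out = summarize_document_py_alt text limit
instance (text : Option String) (limit : Int) (out : String) : Decidable (Spec_summarize_document_py text limit out) := by unfold Spec_summarize_document_py; infer_instance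

-- ===== CLAIM (what is proved, stated in full; the proofs are below) =====
def Claim_equal_summarize_document_py : Prop := ∀ (text : Option String) (limit : Int), Dom_summarize_document_py text limit → Spec_summarize_document_py text limit (summarize_document_py text limit)

-- ===== LEMMAS AND PROOFS =====

-- proof-side: A's step on an already-stripped line
def pvStepS (st : List String × Bool × Nat) (s : String) : List String × Bool × Nat :=
  if s = "---" ∧ st.2.2 < 2 then (st.1, !st.2.1, st.2.2 + 1)
  else if st.2.1 || s == "" || PySem.Str.startswith s "#" then st
  else (st.1 ++ [s], st.2.1, st.2.2)

def pvKeep (s : String) : Bool := !(s == "") && !(PySem.Str.startswith s "#")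

lemma pvStep_notin (acc : List String) (m : Nat) (hm : ¬ m < 2) (s : String) :
    pvStepS (acc, false, m) s = ((if pvKeep s then acc ++ [s] else acc), false, m) := by
  by_cases h1 : s = "" <;> by_cases h2 : PySem.Str.startswith s "#" = true <;>
    simp_all [pvStepS, pvKeep]

-- after two markers the loop is a plain filter
lemma pvL2 (ss : List String) (acc : List String) (m : Nat) (hm : ¬ m < 2) :
    (ss.foldl pvStepS (acc, false, m)).1 = acc ++ ss.filter pvKeep := by
  induction ss generalizing acc with
  | nil => simp
  | cons s t ih =>
    rw [List.foldl_cons, pvStep_notin acc m hm s, List.filter_cons]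
    by_cases hk : pvKeep s <;> simp [hk, ih]

-- in frontmatter with one marker seen
lemma pvL1 (ss : List String) (acc : List String) :
    (ss.foldl pvStepS (acc, true, 1)).1 =
      acc ++ (match PySem.List.index? ss "---" with
              | none => []
              | some j => (ss.drop (j+1)).filter pvKeep) := by
  induction ss generalizing acc with
  | nil => simp
  | cons s t ih =>
    rw [List.foldl_cons]
    by_cases h : s = "---"
    · subst h
      have hstep : pvStepS (acc, true, 1) "---" = (acc, false, 2) := by
        simp [pvStepS]
      rw [hstep, PySem.List.index?_cons_self]
      simpa using pvL2 t acc 2 (by omega)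
    · have hstep : pvStepS (acc, true, 1) s = (acc, true, 1) := by
        simp [pvStepS, h]
      rw [hstep, PySem.List.index?_cons_of_ne t h, ih]
      cases hj : PySem.List.index? t "---" <;> simp

def pvKeptLines (ss : List String) : List String :=
  match PySem.List.index? ss "---" with
  | none => ss.filter pvKeep
  | some i =>
    (ss.take i).filter pvKeep ++
      (match PySem.List.index? (ss.drop (i+1)) "---" with
       | none => []
       | some j => ((ss.drop (i+1)).drop (j+1)).filter pvKeep)

lemma pvKeptLines_cons (s : String) (t : List String) (h : s ≠ "---") :
    pvKeptLines (s :: t) = (if pvKeep s then [s] else []) ++ pvKeptLines t := by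
  unfold pvKeptLines
  rw [PySem.List.index?_cons_of_ne t h]
  cases hi : PySem.List.index? t "---" with
  | none => simp [List.filter_cons]; split <;> simp
  | some i =>
    simp only [Option.map_some, List.take_succ_cons, List.filter_cons,
      List.drop_succ_cons]
    split <;> simp

lemma pvL0 (ss : List String) (acc : List String) :
    (ss.foldl pvStepS (acc, false, 0)).1 = acc ++ pvKeptLines ss := by
  induction ss generalizing acc with
  | nil => simp [pvKeptLines]
  | cons s t ih =>
    rw [List.foldl_cons]
    by_cases h : s = "---"
    · subst h
      have hstep : pvStepS (acc, false, 0) "---" = (acc, true, 1) := by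
        simp [pvStepS]
      rw [hstep, pvL1 t acc]
      unfold pvKeptLines
      rw [PySem.List.index?_cons_self]
      cases hj : PySem.List.index? t "---" <;>
        simp only [List.take_zero, List.filter_nil, List.drop_succ_cons,
          List.drop_zero, hj, List.nil_append]
    · have hstep : pvStepS (acc, false, 0) s
          = ((if pvKeep s then acc ++ [s] else acc), false, 0) := by
        by_cases h1 : s = "" <;> by_cases h2 : PySem.Str.startswith s "#" = true <;>
          simp_all [pvStepS, pvKeep]
      rw [hstep, pvKeptLines_cons s t h]
      by_cases hk : pvKeep s <;> simp [hk, ih]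

-- A's fold over raw lines equals the stripped-line fold
lemma pvFoldA_eq (raws : List String) :
    (raws.foldl pvStepA ([], false, 0)).1 = pvKeptLines (raws.map PySem.Str.strip) := by
  have h1 : raws.foldl pvStepA ([], false, 0)
      = (raws.map PySem.Str.strip).foldl pvStepS ([], false, 0) := by
    rw [List.foldl_map]
    rfl
  rw [h1, pvL0]
  simp

-- B's kept-and-filtered lines equal pvKeptLines
lemma pvKeptB_eq (ss : List String) :
    (match PySem.List.index? ss "---" with
     | none => ss
     | some i =>
       match (PySem.List.index? (ss.drop (i+1)) "---").map (· + (i+1)) with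
       | none => ss.take i
       | some j => ss.take i ++ ss.drop (j+1)).filter pvKeep = pvKeptLines ss := by
  unfold pvKeptLines
  cases hi : PySem.List.index? ss "---" with
  | none => rfl
  | some i =>
    cases hj : PySem.List.index? (ss.drop (i+1)) "---" with
    | none =>
      rw [PySem.List.index?_eq_idxOf?] at hj
      simp [hj]
    | some j =>
      simp only [hj, Option.map_some, List.filter_append, List.drop_drop]
      have harith : j + (i + 1) + 1 = i + 1 + (j + 1) := by omega
      rw [harith]

-- ===== VERDICT (by name: the statement is the Claim_ definition above) =====
theorem summarize_document_py_spec : Claim_equal_summarize_document_py := by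
  intro text limit _
  unfold Spec_summarize_document_py summarize_document_py summarize_document_py_alt
  by_cases hc : PySem.Str.strip (text.getD "") = ""
  · simp [hc]
  · simp only [if_neg hc]
    rw [pvFoldA_eq, ← pvKeptB_eq ((PySem.Str.splitlines (text.getD "")).map PySem.Str.strip)]
    rfl
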